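-- pv_equiv track=rewrite | github.com/francois-finance/grain_news_ai | src/scoring_macro.py | compute_macro_score
-- ===== SOURCE A (Python) =====
-- from typing import List, Dict, Any
--
-- def _safe_get(row: Dict[str, Any], key: str, default: str = "") -> str:
--     v = row.get(key)
--     return v if v is not None else default
--
-- def _sentiment_score(sentiment: str) -> int:
--     s = (sentiment or "").lower()
--     if s == "bullish":
--         return 1
--     if s == "bearish":
--         return -1
--     return 0
--
-- def classify_macro_theme(row: Dict[str, Any]) -> str:
--     """
--     Classe un article 'macro' dans un thème :
--     weather / fx / energy / shipping / other
--     basé sur event_type + url.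
--     (Version locale à ce module pour éviter l'import circulaire.)
--     """
--     et = (_safe_get(row, "event_type", "other") or "other").lower()
--     url = (_safe_get(row, "url", "") or "").lower()
--
--     # Météo
--     if et == "weather" or any(x in url for x in ["noaa", "droughtmonitor", "ecmwf", "climate.gov"]):
--         return "weather"
--
--     # FX / devises
--     if any(x in url for x in ["currencies/usd", "dollar-index", "usd-brl", "usd-ars"]):
--         return "fx"
--
--     # Énergie
--     if any(x in url for x in ["brent-oil", "eia.gov", "energy"]):
--         return "energy"
--
--     # Shipping / logistique
--     if et == "logistics" or any(x in url for x in ["splash247", "blackseagrain", "baltic"]):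
--         return "shipping"
--
--     return "other"
--
-- def compute_macro_score(macro_rows: List[Dict[str, Any]]) -> Dict[str, int]:
--     """
--     Agrège les articles 'macro' pour produire un score macro-grains.
--
--     Retourne un dict :
--       {
--         "final_macro_score": -5..+5,
--         "weather": int,
--         "fx": int,
--         "energy": int,
--         "shipping": int,
--         "other": int,
--       }
--     """
--     weather_score = 0
--     fx_score = 0
--     energy_score = 0
--     shipping_score = 0
--     other_score = 0
--
--     for r in macro_rows:
--         theme = classify_macro_theme(r)
--         sent = _sentiment_score(_safe_get(r, "sentiment", "neutral"))
--
--         if theme == "weather":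
--             weather_score += sent
--         elif theme == "fx":
--             fx_score += sent
--         elif theme == "energy":
--             energy_score += sent
--         elif theme == "shipping":
--             shipping_score += sent
--         else:
--             other_score += sent
--
--     final = weather_score + fx_score + energy_score + shipping_score + other_score
--     final = max(-5, min(5, final))  # clamp entre -5 et +5
--
--     return {
--         "final_macro_score": final,
--         "weather": weather_score,
--         "fx": fx_score,
--         "energy": energy_score,
--         "shipping": shipping_score,
--         "other": other_score,
--     }
-- ===== SOURCE B (Python) =====
-- from typing import List, Dict, Any
--
-- def _safe_get(row: Dict[str, Any], key: str, default: str = "") -> str: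
--     v = row.get(key)
--     return v if v is not None else default
--
-- def _sentiment_score(sentiment: str) -> int:
--     s = (sentiment or "").lower()
--     if s == "bullish":
--         return 1
--     if s == "bearish":
--         return -1
--     return 0
--
-- def classify_macro_theme(row: Dict[str, Any]) -> str:
--     et = (_safe_get(row, "event_type", "other") or "other").lower()
--     url = (_safe_get(row, "url", "") or "").lower()
--     if et == "weather" or any(x in url for x in ["noaa", "droughtmonitor", "ecmwf", "climate.gov"]):
--         return "weather"
--     if any(x in url for x in ["currencies/usd", "dollar-index", "usd-brl", "usd-ars"]):
--         return "fx"
--     if any(x in url for x in ["brent-oil", "eia.gov", "energy"]):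
--         return "energy"
--     if et == "logistics" or any(x in url for x in ["splash247", "blackseagrain", "baltic"]):
--         return "shipping"
--     return "other"
--
-- def compute_macro_score(macro_rows: List[Dict[str, Any]]) -> Dict[str, int]:
--     # One classification pass producing (theme, sentiment) pairs,
--     # then a reduction per theme over those pairs.
--     pairs = [(classify_macro_theme(r),
--               _sentiment_score(_safe_get(r, "sentiment", "neutral")))
--              for r in macro_rows]
--     final = max(-5, min(5, sum(s for _, s in pairs)))
--     out = {"final_macro_score": final}
--     for theme in ("weather", "fx", "energy", "shipping", "other"):
--         out[theme] = sum(s for t, s in pairs if t == theme)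
--     return out
-- ===== Notes on version B (the rewrite author's own statement) =====
-- stated objective: alternative
-- what changed: Replaces the five accumulator variables and the if/elif dispatch with a two-pass group-then-reduce: one map pass producing (theme, sentiment) pairs, then each of the five theme totals is a filtered sum over those pairs; the clamped final score is the plain sum of all sentiments.
import Mathlib
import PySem

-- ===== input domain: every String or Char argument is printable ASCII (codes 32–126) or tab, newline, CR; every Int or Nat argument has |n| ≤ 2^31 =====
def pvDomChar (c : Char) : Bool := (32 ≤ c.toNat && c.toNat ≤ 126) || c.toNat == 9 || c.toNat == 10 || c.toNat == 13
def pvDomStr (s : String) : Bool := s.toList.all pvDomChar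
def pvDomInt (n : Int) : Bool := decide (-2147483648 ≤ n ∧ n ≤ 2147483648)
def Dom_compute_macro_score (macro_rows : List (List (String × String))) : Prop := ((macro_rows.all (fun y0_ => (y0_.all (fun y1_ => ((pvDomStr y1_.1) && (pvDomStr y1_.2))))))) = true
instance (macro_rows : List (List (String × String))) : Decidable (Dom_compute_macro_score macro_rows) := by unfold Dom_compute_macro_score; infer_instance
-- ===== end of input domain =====

-- B replaces A's five accumulators and if/elif dispatch by one map pass to (theme, sentiment)
-- pairs followed by a filtered-sum reduction per theme (alternative decomposition, same cost).

-- ===== PORT A =====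
-- _safe_get(row, key, default)
def pvSafeGet (row : List (String × String)) (key dflt : String) : String :=
  match (PySem.Dict.mk row).get? key with
  | some v => v
  | none => dflt

-- _sentiment_score(sentiment); 'sentiment or ""' is the identity on strings here
def pvSentimentScore (sentiment : String) : Int :=
  let s := PySem.Str.lower sentiment
  if s = "bullish" then 1
  else if s = "bearish" then -1
  else 0

-- classify_macro_theme(row)
def pvClassify (row : List (String × String)) : String :=
  let et0 := pvSafeGet row "event_type" "other"
  let et := PySem.Str.lower (if et0 = "" then "other" else et0)
  let url := PySem.Str.lower (pvSafeGet row "url" "")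
  if et = "weather" ∨ (["noaa", "droughtmonitor", "ecmwf", "climate.gov"].any (fun x => PySem.Str.isIn x url)) then "weather"
  else if ["currencies/usd", "dollar-index", "usd-brl", "usd-ars"].any (fun x => PySem.Str.isIn x url) then "fx"
  else if ["brent-oil", "eia.gov", "energy"].any (fun x => PySem.Str.isIn x url) then "energy"
  else if et = "logistics" ∨ (["splash247", "blackseagrain", "baltic"].any (fun x => PySem.Str.isIn x url)) then "shipping"
  else "other"

-- the loop body of A: dispatch the row's sentiment onto one of five accumulators
def pvStepA (acc : Int × Int × Int × Int × Int) (r : List (String × String)) : Int × Int × Int × Int × Int :=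
  let theme := pvClassify r
  let sent := pvSentimentScore (pvSafeGet r "sentiment" "neutral")
  let (w, f, e, sh, o) := acc
  if theme = "weather" then (w + sent, f, e, sh, o)
  else if theme = "fx" then (w, f + sent, e, sh, o)
  else if theme = "energy" then (w, f, e + sent, sh, o)
  else if theme = "shipping" then (w, f, e, sh + sent, o)
  else (w, f, e, sh, o + sent)

def compute_macro_score (macro_rows : List (List (String × String))) : List (String × Int) :=
  let (w, f, e, sh, o) := macro_rows.foldl pvStepA (0, 0, 0, 0, 0)
  let final := max (-5) (min 5 (w + f + e + sh + o))
  [("final_macro_score", final), ("weather", w), ("fx", f), ("energy", e), ("shipping", sh), ("other", o)]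

-- ===== PORT B =====
def compute_macro_score_alt (macro_rows : List (List (String × String))) : List (String × Int) :=
  let pairs := macro_rows.map (fun r =>
    (pvClassify r, pvSentimentScore (pvSafeGet r "sentiment" "neutral")))
  let final := max (-5) (min 5 ((pairs.map (·.2)).sum))
  ("final_macro_score", final) ::
    ["weather", "fx", "energy", "shipping", "other"].map (fun theme =>
      (theme, ((pairs.filter (fun p => p.1 = theme)).map (·.2)).sum))

-- ===== PRECONDITION & SPEC =====
def Spec_compute_macro_score (macro_rows : List (List (String × String))) (out : List (String × Int)) : Prop := out = compute_macro_score_alt macro_rows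
instance (macro_rows : List (List (String × String))) (out : List (String × Int)) : Decidable (Spec_compute_macro_score macro_rows out) := by unfold Spec_compute_macro_score; infer_instance

-- ===== CLAIM (what is proved, stated in full; the proofs are below) =====
def Claim_equal_compute_macro_score : Prop := ∀ (macro_rows : List (List (String × String))), Dom_compute_macro_score macro_rows → Spec_compute_macro_score macro_rows (compute_macro_score macro_rows)

-- ===== LEMMAS AND PROOFS =====
-- B's per-theme filtered sum, as a function of the row list
def pvThemeSum (theme : String) (rows : List (List (String × String))) : Int :=
  (((rows.map (fun r => (pvClassify r, pvSentimentScore (pvSafeGet r "sentiment" "neutral")))).filter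
      (fun p => p.1 = theme)).map (·.2)).sum

lemma pvClassify_mem (r : List (String × String)) :
    pvClassify r = "weather" ∨ pvClassify r = "fx" ∨ pvClassify r = "energy" ∨
      pvClassify r = "shipping" ∨ pvClassify r = "other" := by
  simp only [pvClassify]
  split_ifs <;> simp

lemma pvLoop (rows : List (List (String × String))) (w f e sh o : Int) :
    rows.foldl pvStepA (w, f, e, sh, o) =
      (w + pvThemeSum "weather" rows, f + pvThemeSum "fx" rows, e + pvThemeSum "energy" rows,
        sh + pvThemeSum "shipping" rows, o + pvThemeSum "other" rows) := by
  induction rows generalizing w f e sh o with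
  | nil => simp [pvThemeSum]
  | cons r rs ih =>
    simp only [List.foldl_cons]
    rcases pvClassify_mem r with h | h | h | h | h <;>
      simp [pvStepA, pvThemeSum, h, ih] <;> ring_nf
  
lemma pvSum_split (rows : List (List (String × String))) :
    pvThemeSum "weather" rows + pvThemeSum "fx" rows + pvThemeSum "energy" rows +
      pvThemeSum "shipping" rows + pvThemeSum "other" rows =
      ((rows.map (fun r => (pvClassify r, pvSentimentScore (pvSafeGet r "sentiment" "neutral")))).map (·.2)).sum := by
  induction rows with
  | nil => simp [pvThemeSum]
  | cons r rs ih =>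
    rcases pvClassify_mem r with h | h | h | h | h <;>
      simp [pvThemeSum, h] at ih ⊢ <;> linarith

-- ===== VERDICT (by name: the statement is the Claim_ definition above) =====
theorem compute_macro_score_spec : Claim_equal_compute_macro_score := by
  intro rows _
  unfold Spec_compute_macro_score compute_macro_score compute_macro_score_alt
  rw [pvLoop]
  simp only [zero_add]
  rw [← pvSum_split]
  simp [pvThemeSum]
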